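-- pv_equiv track=rewrite | github.com/Szymon-Budziak/Introduction_to_Computer_Science_course_AGH | Section_7/Exercise_16.py | count_number_of_5s
-- ===== SOURCE A (Python) =====
-- def count_number_of_5s(number):
--     count = 0
--     while number > 0:
--         if number % 8 == 5:
--             count += 1
--         number //= 8
--     if count % 2 == 0:
--         return True
--     return False
-- ===== SOURCE B (Python) =====
-- def count_number_of_5s(number):
--     # Parity as a boolean recursion: no counter at all.
--     # True iff the count of base-8 digits equal to 5 is even.
--     if number <= 0:
--         return True
--     return (number % 8 != 5) == count_number_of_5s(number // 8)
-- ===== Notes on version B (the rewrite author's own statement) =====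
-- stated objective: alternative
-- what changed: Replaces the while-loop with an integer counter and final parity test by a direct structural recursion that carries no counter: the parity is computed as an iterated boolean equality over the base-8 digits.
import Mathlib
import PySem

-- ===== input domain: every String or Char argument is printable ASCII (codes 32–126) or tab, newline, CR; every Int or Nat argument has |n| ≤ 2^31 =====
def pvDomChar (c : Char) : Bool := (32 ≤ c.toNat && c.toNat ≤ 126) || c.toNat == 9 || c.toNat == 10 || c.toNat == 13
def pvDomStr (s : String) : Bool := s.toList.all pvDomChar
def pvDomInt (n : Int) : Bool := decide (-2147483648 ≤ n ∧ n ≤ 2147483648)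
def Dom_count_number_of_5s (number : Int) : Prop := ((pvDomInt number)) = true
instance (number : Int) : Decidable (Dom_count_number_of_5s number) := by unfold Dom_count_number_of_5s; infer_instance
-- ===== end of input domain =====

-- B replaces A's counter-accumulating while-loop and final parity test by a counter-free
-- boolean recursion over the base-8 digits (objective: alternative decomposition, same cost).


-- ===== PORT A =====
-- loop: while number > 0: if number % 8 == 5: count += 1; number //= 8
def pvALoop (number : Int) (count : Int) : Int :=
  if number > 0 then
    pvALoop (PySem.Int.floordiv number 8) (if PySem.Int.mod number 8 = 5 then count + 1 else count)
  else count
termination_by number.toNat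
decreasing_by
  have h8 : PySem.Int.floordiv number 8 = number / 8 := PySem.Int.floordiv_eq_ediv_of_pos (by omega)
  omega

def count_number_of_5s (number : Int) : Bool :=
  let count := pvALoop number 0
  if PySem.Int.mod count 2 = 0 then true else false

-- ===== PORT B =====
def count_number_of_5s_alt (number : Int) : Bool :=
  if number ≤ 0 then true
  else (decide (PySem.Int.mod number 8 ≠ 5)) == count_number_of_5s_alt (PySem.Int.floordiv number 8)
termination_by number.toNat
decreasing_by
  have h8 : PySem.Int.floordiv number 8 = number / 8 := PySem.Int.floordiv_eq_ediv_of_pos (by omega)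
  omega

-- ===== PRECONDITION & SPEC =====
def Spec_count_number_of_5s (number : Int) (out : Bool) : Prop := out = count_number_of_5s_alt number
instance (number : Int) (out : Bool) : Decidable (Spec_count_number_of_5s number out) := by unfold Spec_count_number_of_5s; infer_instance

-- ===== CLAIM (what is proved, stated in full; the proofs are below) =====
def Claim_equal_count_number_of_5s : Prop := ∀ (number : Int), Dom_count_number_of_5s number → Spec_count_number_of_5s number (count_number_of_5s number)

-- ===== LEMMAS AND PROOFS =====

-- ===== VERDICT (by name: the statement is the Claim_ definition above) =====
theorem pvLoop_key (fuel : Nat) : ∀ (number count : Int), number.toNat ≤ fuel →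
    decide (PySem.Int.mod (pvALoop number count) 2 = 0)
      = (count_number_of_5s_alt number == decide (PySem.Int.mod count 2 = 0)) := by
  induction fuel with
  | zero =>
    intro number count h
    have hn : ¬ number > 0 := by omega
    rw [pvALoop, count_number_of_5s_alt]
    simp [hn, show number ≤ 0 by omega]
  | succ k ih =>
    intro number count h
    by_cases hpos : number > 0
    · have h8 : PySem.Int.floordiv number 8 = number / 8 := PySem.Int.floordiv_eq_ediv_of_pos (by omega)
      have hle : (PySem.Int.floordiv number 8).toNat ≤ k := by omega
      rw [pvALoop, count_number_of_5s_alt]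
      simp only [hpos, if_true, show ¬ number ≤ 0 by omega, if_false]
      by_cases hd : PySem.Int.mod number 8 = 5
      · simp only [hd, if_true]
        rw [ih _ (count + 1) hle]
        have hflip : decide (PySem.Int.mod (count + 1) 2 = 0) = ! decide (PySem.Int.mod count 2 = 0) := by
          rw [PySem.Int.mod_eq_emod_of_pos (a := count + 1) (by omega),
              PySem.Int.mod_eq_emod_of_pos (a := count) (by omega)]
          by_cases hc : count % 2 = 0
          · simp [hc]; omega
          · simp [hc]; omega
        rw [hflip]
        cases hb : count_number_of_5s_alt (PySem.Int.floordiv number 8) <;>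
          cases hc : decide (PySem.Int.mod count 2 = 0) <;> simp
      · simp only [hd, if_false]
        rw [ih _ count hle]
        rw [show (decide (¬ PySem.Int.mod number 8 = 5)) = true from by
          simp only [decide_eq_true_eq]; exact hd]
        cases hb : count_number_of_5s_alt (PySem.Int.floordiv number 8) <;>
          cases hc : decide (PySem.Int.mod count 2 = 0) <;> simp
    · rw [pvALoop, count_number_of_5s_alt]
      simp [hpos, show number ≤ 0 by omega]

theorem count_number_of_5s_spec : Claim_equal_count_number_of_5s := by
  intro number _
  unfold Spec_count_number_of_5s count_number_of_5s
  have key := pvLoop_key number.toNat number 0 (le_refl _)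
  have h0 : decide (PySem.Int.mod (0:Int) 2 = 0) = true := by decide
  rw [h0] at key
  by_cases h : PySem.Int.mod (pvALoop number 0) 2 = 0
  · simp only [h, decide_true] at key
    simp only [h, if_true]
    cases hb : count_number_of_5s_alt number
    · rw [hb] at key; exact absurd key (by decide)
    · rfl
  · simp only [h, decide_false] at key
    simp only [h, if_false]
    cases hb : count_number_of_5s_alt number
    · rfl
    · rw [hb] at key; exact absurd key (by decide)
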